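-- pv_equiv track=rewrite | github.com/ehgus5825/etc_study | coding_test/programers/46_Lv2 괄호 변환.py | solution
-- ===== SOURCE A (Python) =====
-- def divide(p):
--     left, right = 0,0
--     for i in range(0, len(p)):
--         if(p[i] == ')'):
--             right += 1
--         else:
--             left += 1
--
--         if(right == left):
--             return i
--
--     return len(p) - 1
--
-- def isRight(p):
--     if(p[0] == ')'):
--         return False
--
--     arr = [p[0]]
--     for i in range(1,len(p)):
--         if(p[i] == '('):
--             arr.append(p[i])
--         else:
--             if(len(arr) != 0 and arr[-1] == '('):
--                 arr.pop()
--             else: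
--                 arr.append(p[i])
--
--     if(len(arr) == 0):
--         return True
--
--     return False
--
-- def solution(p):
--     if(p == ""):
--         return ""
--
--     tmp = divide(p)
--     u, v = p[0:tmp + 1], p[tmp + 1:]
--
--     if(isRight(u)):
--         return u + solution(v)
--     else:
--         w = "(" + solution(v) + ")"
--         tmp1 = u[1:-1]
--         tmp2 = ""
--         for i in range(0, len(tmp1)):
--             if(tmp1[i] == ')'):
--                 tmp2 += "("
--             else:
--                 tmp2 += ")"
--         return w + tmp2
-- ===== SOURCE B (Python) =====
-- def is_balanced(s):
--     depth = 0
--     for ch in s: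
--         if ch == '(':
--             depth += 1
--         elif depth > 0:
--             depth -= 1
--         else:
--             return False
--     return depth == 0
--
-- def solution(p):
--     # one pass: split p into minimal balanced chunks (trailing unbalanced remainder
--     # becomes the last chunk), then fold the chunk list right-to-left
--     chunks = []
--     cur = []
--     bal = 0
--     for c in p:
--         cur.append(c)
--         bal += -1 if c == ')' else 1
--         if bal == 0:
--             chunks.append(''.join(cur))
--             cur = []
--             bal = 0
--     if cur:
--         chunks.append(''.join(cur))
--     acc = ""
--     for chunk in reversed(chunks):
--         if is_balanced(chunk):
--             acc = chunk + acc
--         else: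
--             inner = chunk[1:-1]
--             acc = "(" + acc + ")" + ''.join('(' if ch == ')' else ')' for ch in inner)
--     return acc
-- ===== Notes on version B (the rewrite author's own statement) =====
-- stated objective: alternative
-- what changed: Replaces A's recursive divide()/slice/recurse structure by a single chunking pass that cuts p into minimal balanced chunks (trailing unbalanced remainder as last chunk) followed by a right-to-left fold over the chunk list, and replaces the stack-based isRight by a depth counter and A's character-by-character string concatenation by joins.
import Mathlib
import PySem

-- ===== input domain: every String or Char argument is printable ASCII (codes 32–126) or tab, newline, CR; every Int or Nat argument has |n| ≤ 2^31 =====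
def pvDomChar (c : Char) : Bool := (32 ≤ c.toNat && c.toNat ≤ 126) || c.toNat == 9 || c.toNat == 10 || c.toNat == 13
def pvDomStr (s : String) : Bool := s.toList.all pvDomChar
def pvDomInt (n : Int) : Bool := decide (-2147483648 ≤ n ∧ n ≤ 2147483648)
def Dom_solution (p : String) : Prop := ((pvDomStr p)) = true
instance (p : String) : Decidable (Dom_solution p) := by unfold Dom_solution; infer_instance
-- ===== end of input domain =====

-- B replaces A's recursive divide/isRight segmentation by a single chunking pass plus a right fold over the chunk list (simpler decomposition).


-- ===== PORT A =====
-- divide's loop: returns the relative index (within `rest`) at which right == left first holds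
def divideAux : List Char → Int → Int → Option Nat
  | [], _, _ => none
  | c :: rest, left, right =>
    let left := if c = ')' then left else left + 1
    let right := if c = ')' then right + 1 else right
    if right = left then some 0 else (divideAux rest left right).map (· + 1)

def divideA (p : List Char) : Nat := (divideAux p 0 0).getD (p.length - 1)

-- isRight's stack loop; the stack top is at the head (Python appends/pops at the end)
def isRightAux : List Char → List Char → List Char
  | [], arr => arr
  | c :: rest, arr =>
    if c = '(' then isRightAux rest (c :: arr)
    else if arr.head? = some '(' then isRightAux rest arr.tail
    else isRightAux rest (c :: arr)

-- Python's isRight indexes p[0]; it is only ever called on nonempty u, [] is unreachable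
def isRightA (p : List Char) : Bool :=
  match p with
  | [] => false
  | c :: rest => if c = ')' then false else (isRightAux rest [c]).isEmpty

-- the tmp2-building loop of solution
def flipA (l : List Char) : List Char :=
  l.foldl (fun acc c => acc ++ [if c = ')' then '(' else ')']) []

def solutionA (p : List Char) : List Char :=
  if h : p = [] then []
  else
    let tmp := divideA p
    let u := p.take (tmp + 1)
    let v := p.drop (tmp + 1)
    if isRightA u then u ++ solutionA v
    else ('(' :: solutionA v ++ [')']) ++ flipA ((u.drop 1).dropLast)
termination_by p.length
decreasing_by
  all_goals
    simp only [List.length_drop]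
    have : 0 < p.length := List.length_pos_iff.mpr h
    omega

def solution (p : String) : String := String.mk (solutionA p.toList)

-- ===== PORT B =====
def isBalB : List Char → Int → Bool
  | [], d => d = 0
  | c :: rest, d =>
    if c = '(' then isBalB rest (d + 1)
    else if d > 0 then isBalB rest (d - 1)
    else false

-- one pass accumulating the current chunk and its balance
def chunksB : List Char → List Char → Int → List (List Char)
  | [], cur, _ => if cur.isEmpty then [] else [cur]
  | c :: rest, cur, bal =>
    let cur := cur ++ [c]
    let bal := bal + (if c = ')' then -1 else 1)
    if bal = 0 then cur :: chunksB rest [] 0 else chunksB rest cur bal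

def stepB (chunk acc : List Char) : List Char :=
  if isBalB chunk 0 then chunk ++ acc
  else '(' :: acc ++ ')' :: ((chunk.drop 1).dropLast).map (fun ch => if ch = ')' then '(' else ')')

def solutionAltL (p : List Char) : List Char := (chunksB p [] 0).foldr stepB []

def solution_alt (p : String) : String := String.mk (solutionAltL p.toList)

-- ===== PRECONDITION & SPEC =====
def Spec_solution (p : String) (out : String) : Prop := out = solution_alt p
instance (p : String) (out : String) : Decidable (Spec_solution p out) := by unfold Spec_solution; infer_instance

-- ===== CLAIM (what is proved, stated in full; the proofs are below) =====
def Claim_equal_solution : Prop := ∀ (p : String), Dom_solution p → Spec_solution p (solution p)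

-- ===== LEMMAS AND PROOFS =====

-- flipA's foldl builds exactly the map
theorem flipA_eq (l : List Char) :
    flipA l = l.map (fun ch => if ch = ')' then '(' else ')') := by
  have h : ∀ (l acc : List Char),
      l.foldl (fun acc c => acc ++ [if c = ')' then '(' else ')']) acc
        = acc ++ l.map (fun ch => if ch = ')' then '(' else ')') := by
    intro l
    induction l with
    | nil => simp
    | cons c t ih => intro acc; simp [List.foldl, ih]
  simpa [flipA] using h l []

-- a non-'(' char in the stack never leaves it
theorem isRightAux_dead (rest : List Char) :
    ∀ arr, (∃ x ∈ arr, x ≠ '(') → ∃ x ∈ isRightAux rest arr, x ≠ '(' := by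
  induction rest with
  | nil => intro arr h; exact h
  | cons c t ih =>
    intro arr h
    obtain ⟨x, hx, hxne⟩ := h
    by_cases hc : c = '('
    · simp only [isRightAux, if_pos hc]
      exact ih _ ⟨x, List.mem_cons_of_mem _ hx, hxne⟩
    · simp only [isRightAux, if_neg hc]
      by_cases hh : arr.head? = some '('
      · rw [if_pos hh]
        rcases arr with _ | ⟨a, arr'⟩
        · simp at hx
        · have ha : a = '(' := by simpa using hh
          apply ih
          refine ⟨x, ?_, hxne⟩
          rcases List.mem_cons.mp hx with h1 | h1
          · exact absurd (h1 ▸ ha) hxne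
          · simpa using h1
      · rw [if_neg hh]
        exact ih _ ⟨x, by simp [hx], hxne⟩

-- on a pure-'(' stack the stack machine is the depth counter
theorem isRightAux_replicate (rest : List Char) :
    ∀ d : Nat, (isRightAux rest (List.replicate d '(')).isEmpty = isBalB rest d := by
  induction rest with
  | nil =>
    intro d
    cases d with
    | zero => simp [isRightAux, isBalB]
    | succ d =>
      have h0 : ¬((d : Int) + 1 = 0) := by omega
      simp [isRightAux, isBalB, List.replicate_succ, h0]
  | cons c t ih =>
    intro d
    by_cases hc : c = '('
    · have h1 : c :: List.replicate d '(' = List.replicate (d + 1) '(' := by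
        simp [hc, List.replicate_succ]
      rw [isRightAux, if_pos hc, h1, ih (d + 1), isBalB, if_pos hc]
      push_cast
      ring_nf
    · rw [isRightAux, if_neg hc, isBalB, if_neg hc]
      cases d with
      | zero =>
        obtain ⟨x, hx, hxne⟩ := isRightAux_dead t (c :: List.replicate 0 '(') ⟨c, by simp, hc⟩
        have hne : isRightAux t (c :: List.replicate 0 '(') ≠ [] := by
          intro he
          rw [he] at hx
          simp at hx
        have hne' : isRightAux t [c] ≠ [] := by simpa using hne
        simp [hne']
      | succ d =>
        rw [if_pos (by simp [List.replicate_succ]), if_pos (by push_cast; omega)]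
        have h1 : (List.replicate (d + 1) '(').tail = List.replicate d '(' := by
          simp [List.replicate_succ]
        have h2 : ((d + 1 : Nat) : Int) - 1 = (d : Int) := by push_cast; ring
        rw [h1, h2, ih]

theorem isRight_eq (c : Char) (rest : List Char) :
    isRightA (c :: rest) = isBalB (c :: rest) 0 := by
  by_cases hc : c = '('
  · have := isRightAux_replicate rest 1
    simp only [isRightA, hc, isBalB]
    norm_num
    simpa using this
  · by_cases hc' : c = ')'
    · simp [isRightA, isBalB, hc', hc]
    · simp only [isRightA, if_neg hc', isBalB, if_neg hc]
      rw [if_neg (by norm_num)]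
      obtain ⟨x, hx, hxne⟩ := isRightAux_dead rest [c] ⟨c, by simp, hc⟩
      simp [List.isEmpty_iff, List.eq_nil_iff_forall_not_mem]
      exact ⟨x, hx⟩

-- the chunking pass, related to divide's first-balance-point search
theorem chunksB_divide (rest : List Char) :
    ∀ (cur : List Char) (l r : Int),
    chunksB rest cur (l - r) =
      match divideAux rest l r with
      | some t => (cur ++ rest.take (t + 1)) :: chunksB (rest.drop (t + 1)) [] 0
      | none => if (cur ++ rest).isEmpty then [] else [cur ++ rest] := by
  induction rest with
  | nil => intro cur l r; simp [chunksB, divideAux]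
  | cons c t ih =>
    intro cur l r
    by_cases hc : c = ')'
    · subst hc
      by_cases hz : r + 1 = l
      · have hd : divideAux (')' :: t) l r = some 0 := by simp [divideAux, hz]
        have hch : chunksB (')' :: t) cur (l - r) = (cur ++ [')']) :: chunksB t [] 0 := by
          have h1 : l - r + (-1 : Int) = 0 := by omega
          simp [chunksB, h1]
        rw [hch, hd]
        simp
      · have hd : divideAux (')' :: t) l r = (divideAux t l (r + 1)).map (· + 1) := by
          simp [divideAux, hz]
        have hch : chunksB (')' :: t) cur (l - r) = chunksB t (cur ++ [')']) (l - (r + 1)) := by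
          have h1 : l - r + (-1 : Int) = l - (r + 1) := by ring
          have hb0 : l - (r + 1) ≠ 0 := by omega
          simp [chunksB, h1, hb0]
        rw [hch, ih (cur ++ [')']) l (r + 1), hd]
        cases hdv : divideAux t l (r + 1) with
        | none => simp
        | some t' => simp [List.take_succ_cons, List.drop_succ_cons]
    · by_cases hz : r = l + 1
      · have hd : divideAux (c :: t) l r = some 0 := by simp [divideAux, hc, hz]
        have hch : chunksB (c :: t) cur (l - r) = (cur ++ [c]) :: chunksB t [] 0 := by
          have h1 : l - r + (1 : Int) = 0 := by omega
          simp [chunksB, hc, h1]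
        rw [hch, hd]
        simp
      · have hd : divideAux (c :: t) l r = (divideAux t (l + 1) r).map (· + 1) := by
          simp [divideAux, hc]
          intro h
          omega
        have hch : chunksB (c :: t) cur (l - r) = chunksB t (cur ++ [c]) ((l + 1) - r) := by
          have h1 : l - r + (1 : Int) = (l + 1) - r := by ring
          have hb0 : (l + 1) - r ≠ 0 := by omega
          simp [chunksB, hc, h1, hb0]
        rw [hch, ih (cur ++ [c]) (l + 1) r, hd]
        cases hdv : divideAux t (l + 1) r with
        | none => simp
        | some t' => simp [List.take_succ_cons, List.drop_succ_cons]

theorem chunksB_cons (p : List Char) (hp : p ≠ []) :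
    chunksB p [] 0 = p.take (divideA p + 1) :: chunksB (p.drop (divideA p + 1)) [] 0 := by
  have h := chunksB_divide p [] 0 0
  norm_num at h
  cases hdv : divideAux p 0 0 with
  | some t =>
    rw [hdv] at h
    simpa [divideA, hdv] using h
  | none =>
    rw [hdv] at h
    have hdrop : p.drop (divideA p + 1) = [] := by
      apply List.drop_eq_nil_of_le
      simp [divideA, hdv]
      have : 0 < p.length := List.length_pos_iff.mpr hp
      omega
    have htake : p.take (divideA p + 1) = p := by
      apply List.take_of_length_le
      simp [divideA, hdv]
      omega
    rw [hdrop, htake, h]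
    simp [chunksB, hp]

theorem solutionA_eq_aux : ∀ (n : Nat) (p : List Char), p.length ≤ n →
    solutionA p = solutionAltL p := by
  intro n
  induction n with
  | zero =>
    intro p hp
    have : p = [] := List.eq_nil_of_length_eq_zero (Nat.le_zero.mp hp)
    subst this
    simp [solutionA, solutionAltL, chunksB]
  | succ n ih =>
    intro p hp
    by_cases h : p = []
    · subst h; simp [solutionA, solutionAltL, chunksB]
    · rw [solutionA, dif_neg h]
      have hlen : 0 < p.length := List.length_pos_iff.mpr h
      have hv : (p.drop (divideA p + 1)).length ≤ n := by
        simp only [List.length_drop]; omega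
      have ihv := ih _ hv
      rw [solutionAltL, chunksB_cons p h, List.foldr_cons]
      set u := p.take (divideA p + 1) with hu
      have hune : u ≠ [] := by
        simp [hu, List.take_eq_nil_iff]
        omega
      obtain ⟨c, rest, hcr⟩ := List.exists_cons_of_ne_nil hune
      rw [← solutionAltL, ← ihv, stepB, hcr, ← isRight_eq c rest, ← hcr]
      by_cases hr : isRightA u = true
      · rw [if_pos hr, if_pos hr]
      · rw [if_neg hr, if_neg hr, flipA_eq]
        simp only [List.append_assoc, List.cons_append, List.singleton_append, List.nil_append]
        rw [← hu]

-- ===== VERDICT (by name: the statement is the Claim_ definition above) =====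
theorem solution_spec : Claim_equal_solution := by
  intro p _
  unfold Spec_solution solution solution_alt
  rw [solutionA_eq_aux p.toList.length p.toList le_rfl]
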